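-- pv_equiv track=rewrite | github.com/pythseq/rboAnalyzer | rna_blast_analyze/BR_core/predict_structures.py | repair_structure_any_variant
-- ===== SOURCE A (Python) =====
-- def repair_structure_any_variant(structure, gap_mark=49, rep_mark=48):
--     """
--     needs special structure encoding
--     """
--     ns = []
--     for n in structure:
--         c = structure.count(n)
--         if c == 1 & c != gap_mark:
--             ns.append(rep_mark)
--         elif c == 2:
--             ns.append(n)
--         else:
--             ns.append(n)
--     return ns
-- ===== SOURCE B (Python) =====
-- def repair_structure_any_variant(structure, gap_mark=49, rep_mark=48):
--     srt = sorted(structure)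
--     uniq = set()
--     if srt:
--         cur = srt[0]
--         run_is_one = True
--         for y in srt[1:]:
--             if y == cur:
--                 run_is_one = False
--             else:
--                 if run_is_one:
--                     uniq.add(cur)
--                 cur = y
--                 run_is_one = True
--         if run_is_one:
--             uniq.add(cur)
--     return [rep_mark if v in uniq else v for v in structure]
-- ===== Notes on version B (the rewrite author's own statement) =====
-- stated objective: faster
-- what changed: B sorts a copy of the list, scans the sorted copy once tracking the current run to collect values whose run has length 1 into a set, then maps the original list through that set, instead of A's per-element structure.count(n) rescan; B also drops the gap_mark comparison, which in A is a '&'-precedence slip ('c == 1 & c != gap_mark') that only fires when gap_mark == 1.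
-- intended difference: When gap_mark == 1 and the list has an element occurring exactly once that differs from rep_mark, A's mis-parenthesised condition 'c == 1 & c != gap_mark' is always false so A returns the list unchanged, while B replaces each unique element with rep_mark; B's is the intended frequency-based repair since gap_mark is a structure mark, not a count. — e.g. on repair_structure_any_variant([5], 1, 0): A returns [5], B returns [0]
import Mathlib
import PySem

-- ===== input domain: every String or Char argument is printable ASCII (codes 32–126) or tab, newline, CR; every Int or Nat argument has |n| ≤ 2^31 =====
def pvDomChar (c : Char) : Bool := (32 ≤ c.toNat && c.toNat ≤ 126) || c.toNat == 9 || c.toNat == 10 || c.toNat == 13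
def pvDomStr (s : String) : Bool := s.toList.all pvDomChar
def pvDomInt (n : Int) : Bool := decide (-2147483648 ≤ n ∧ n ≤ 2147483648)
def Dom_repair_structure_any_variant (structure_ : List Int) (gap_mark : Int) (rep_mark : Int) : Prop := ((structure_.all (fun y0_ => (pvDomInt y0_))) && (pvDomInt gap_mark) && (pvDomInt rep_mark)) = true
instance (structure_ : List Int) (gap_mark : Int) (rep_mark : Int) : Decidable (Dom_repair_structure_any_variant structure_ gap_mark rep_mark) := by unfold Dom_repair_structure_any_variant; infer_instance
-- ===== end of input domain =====

-- B sorts a copy, scans it once for runs of length 1 to collect the unique values into a set,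
-- and maps the original list through that set (O(n log n)), replacing A's per-element
-- structure.count(n) rescan (O(n^2)); B drops A's gap_mark test, a '&'-precedence slip (see D_).

-- ===== PORT A =====
-- Python's chained 'c == 1 & c != gap_mark' is (c == (1 & c)) and ((1 & c) != gap_mark).
def repair_structure_any_variant (structure_ : List Int) (gap_mark : Int) (rep_mark : Int) : List Int :=
  structure_.foldl (fun ns n =>
    let c : Int := (PySem.List.count structure_ n : Int)
    if c = PySem.Int.band 1 c ∧ PySem.Int.band 1 c ≠ gap_mark then ns ++ [rep_mark]
    else if c = 2 then ns ++ [n]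
    else ns ++ [n]) []

-- ===== PORT B =====
-- the single pass over the sorted copy: cur = current run value, runIsOne = run length so far is 1;
-- close a run by adding its value to the set when its length stayed 1.
def scanRuns : List Int → Int → Bool → List Int → List Int
  | [], cur, runIsOne, acc => if runIsOne then PySem.Set.add acc cur else acc
  | y :: ys, cur, runIsOne, acc =>
    if y == cur then scanRuns ys cur false acc
    else scanRuns ys y true (if runIsOne then PySem.Set.add acc cur else acc)

-- gap_mark is accepted but (as in Source B) never read: A's use of it is the precedence slip.
def repair_structure_any_variant_alt (structure_ : List Int) (gap_mark : Int) (rep_mark : Int) : List Int :=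
  let srt := PySem.List.sorted structure_ (fun v => v) false
  let uniq : PySem.Set Int :=
    match srt with
    | [] => []
    | x :: xs => scanRuns xs x true []
  structure_.map (fun v => if v ∈ uniq then rep_mark else v)

-- ===== PRECONDITION & SPEC =====
-- When gap_mark == 1 and some element occurs exactly once and differs from rep_mark, A's
-- mis-parenthesised 'c == 1 & c != gap_mark' is always false so A returns the list unchanged,
-- while B replaces each unique element with rep_mark; B's is the intended frequency-based
-- repair since gap_mark is a structure mark, not a count.
def D_repair_structure_any_variant (structure_ : List Int) (gap_mark : Int) (rep_mark : Int) : Prop :=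
  gap_mark = 1 ∧ ∃ n ∈ structure_, structure_.count n = 1 ∧ n ≠ rep_mark
instance (structure_ : List Int) (gap_mark : Int) (rep_mark : Int) : Decidable (D_repair_structure_any_variant structure_ gap_mark rep_mark) := by unfold D_repair_structure_any_variant; infer_instance

def Spec_repair_structure_any_variant (structure_ : List Int) (gap_mark : Int) (rep_mark : Int) (out : List Int) : Prop := ¬ D_repair_structure_any_variant structure_ gap_mark rep_mark → out = repair_structure_any_variant_alt structure_ gap_mark rep_mark
instance (structure_ : List Int) (gap_mark : Int) (rep_mark : Int) (out : List Int) : Decidable (Spec_repair_structure_any_variant structure_ gap_mark rep_mark out) := by unfold Spec_repair_structure_any_variant; infer_instance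

def pvDiffWitness_repair_structure_any_variant : List Int × Int × Int := ([5], 1, 0)
def pvDiffWitnessOut_repair_structure_any_variant : (List Int) × (List Int) := ([5], [0])

-- ===== CLAIM (what is proved, stated in full; the proofs are below) =====
def Claim_unchanged_repair_structure_any_variant : Prop := ∀ (structure_ : List Int) (gap_mark : Int) (rep_mark : Int), Dom_repair_structure_any_variant structure_ gap_mark rep_mark → Spec_repair_structure_any_variant structure_ gap_mark rep_mark (repair_structure_any_variant structure_ gap_mark rep_mark)
def Claim_changed_repair_structure_any_variant : Prop := Dom_repair_structure_any_variant (pvDiffWitness_repair_structure_any_variant.1) (pvDiffWitness_repair_structure_any_variant.2.1) (pvDiffWitness_repair_structure_any_variant.2.2) ∧ D_repair_structure_any_variant (pvDiffWitness_repair_structure_any_variant.1) (pvDiffWitness_repair_structure_any_variant.2.1) (pvDiffWitness_repair_structure_any_variant.2.2) ∧ repair_structure_any_variant (pvDiffWitness_repair_structure_any_variant.1) (pvDiffWitness_repair_structure_any_variant.2.1) (pvDiffWitness_repair_structure_any_variant.2.2) = pvDiffWitnessOut_repair_structure_any_variant.1 ∧ repair_structure_any_variant_alt (pvDiffWitness_repair_structure_any_variant.1)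 (pvDiffWitness_repair_structure_any_variant.2.1) (pvDiffWitness_repair_structure_any_variant.2.2) = pvDiffWitnessOut_repair_structure_any_variant.2 ∧ pvDiffWitnessOut_repair_structure_any_variant.1 ≠ pvDiffWitnessOut_repair_structure_any_variant.2
def Claim_exact_repair_structure_any_variant : Prop := ∀ (structure_ : List Int) (gap_mark : Int) (rep_mark : Int), Dom_repair_structure_any_variant structure_ gap_mark rep_mark → D_repair_structure_any_variant structure_ gap_mark rep_mark → repair_structure_any_variant structure_ gap_mark rep_mark ≠ repair_structure_any_variant_alt structure_ gap_mark rep_mark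

-- ===== LEMMAS AND PROOFS =====

-- the run scan collects, over a nondecreasing remainder, exactly: the old set, cur if its run
-- stayed of length 1, and the values of count 1 in the remainder.
theorem mem_scanRuns (ys : List Int) : ∀ (cur : Int) (u : Bool) (acc : List Int),
    ys.Pairwise (· ≤ ·) → (∀ y ∈ ys, cur ≤ y) → ∀ v,
    (v ∈ scanRuns ys cur u acc ↔
      v ∈ acc ∨ (v = cur ∧ u = true ∧ cur ∉ ys) ∨ (v ≠ cur ∧ ys.count v = 1)) := by
  induction ys with
  | nil =>
    intro cur u acc _ _ v
    cases u <;> simp [scanRuns, PySem.Set.mem_add]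
  | cons y t ih =>
    intro cur u acc hpw hle v
    obtain ⟨hyt, htpw⟩ := List.pairwise_cons.mp hpw
    by_cases hy : y = cur
    · subst hy
      rw [scanRuns, if_pos (by simp)]
      rw [ih y false acc htpw hyt v]
      simp only [List.count_cons]
      by_cases hv : v = y
      · have h1 : (if (y == v) = true then 1 else 0) = 1 := by simp [hv.symm]
        rw [h1]
        constructor
        · rintro (h | ⟨_, h, _⟩ | ⟨h, _⟩)
          · exact Or.inl h
          · exact absurd h (by simp)
          · exact absurd hv h
        · rintro (h | ⟨_, _, h⟩ | ⟨h, _⟩)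
          · exact Or.inl h
          · exact absurd (by simp : y ∈ y :: t) h
          · exact absurd hv h
      · have h1 : (if (y == v) = true then 1 else 0) = 0 := by simp only [beq_iff_eq, ite_eq_right_iff]; exact fun h => absurd h.symm hv
        rw [h1]
        constructor
        · rintro (h | ⟨h, _⟩ | ⟨_, h⟩)
          · exact Or.inl h
          · exact absurd h hv
          · exact Or.inr (Or.inr ⟨hv, by omega⟩)
        · rintro (h | ⟨h, _⟩ | ⟨_, h⟩)
          · exact Or.inl h
          · exact absurd h hv
          · exact Or.inr (Or.inr ⟨hv, by omega⟩)
    · have hcy : cur < y := lt_of_le_of_ne (hle y (by simp)) (Ne.symm hy)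
      have hcnot : cur ∉ y :: t := by
        intro h
        rcases List.mem_cons.mp h with h | h
        · exact hy h.symm
        · have := hyt cur h; omega
      have hcnt : cur ∉ t := fun h => hcnot (by simp [h])
      have haccm : (v ∈ if u then PySem.Set.add acc cur else acc) ↔ v ∈ acc ∨ (u = true ∧ v = cur) := by
        cases u <;> simp [PySem.Set.mem_add]
      have htc0 : t.count cur = 0 := List.count_eq_zero.mpr hcnt
      rw [scanRuns, if_neg (by simp [hy])]
      rw [ih y true (if u then PySem.Set.add acc cur else acc) htpw hyt v]
      rw [haccm]
      simp only [List.count_cons]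
      by_cases hv1 : v = cur
      · have hvy : v ≠ y := fun h => hy (h ▸ hv1)
        constructor
        · rintro ((h | ⟨hu, _⟩) | ⟨hvy', _, _⟩ | ⟨_, hc⟩)
          · exact Or.inl h
          · exact Or.inr (Or.inl ⟨hv1, hu, hcnot⟩)
          · exact absurd hvy' hvy
          · rw [hv1] at hc; rw [htc0] at hc; exact absurd hc (by simp)
        · rintro (h | ⟨_, hu, _⟩ | ⟨hne, _⟩)
          · exact Or.inl (Or.inl h)
          · exact Or.inl (Or.inr ⟨hu, hv1⟩)
          · exact absurd hv1 hne
      · by_cases hv2 : v = y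
        · have hif : (if (y == v) = true then 1 else 0) = 1 := by simp [hv2.symm]
          rw [hif]
          constructor
          · rintro ((h | ⟨_, hc⟩) | ⟨_, _, hnt⟩ | ⟨hne, _⟩)
            · exact Or.inl h
            · exact absurd hc hv1
            · refine Or.inr (Or.inr ⟨hv1, ?_⟩)
              have h0 : t.count v = 0 := List.count_eq_zero.mpr (by rw [hv2]; exact hnt)
              omega
            · exact absurd hv2 hne
          · rintro (h | ⟨hc, _⟩ | ⟨_, hc⟩)
            · exact Or.inl (Or.inl h)
            · exact absurd hc hv1
            · refine Or.inr (Or.inl ⟨hv2, trivial, ?_⟩)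
              have h0 : t.count v = 0 := by omega
              have hni := List.count_eq_zero.mp h0
              rw [hv2] at hni; exact hni
        · have hif : (if (y == v) = true then 1 else 0) = 0 := by simp only [beq_iff_eq, ite_eq_right_iff]; exact fun h => absurd h.symm hv2
          rw [hif]
          constructor
          · rintro ((h | ⟨_, hc⟩) | ⟨hc, _, _⟩ | ⟨_, hc⟩)
            · exact Or.inl h
            · exact absurd hc hv1
            · exact absurd hc hv2
            · exact Or.inr (Or.inr ⟨hv1, by omega⟩)
          · rintro (h | ⟨hc, _⟩ | ⟨_, hc⟩)
            · exact Or.inl (Or.inl h)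
            · exact absurd hc hv1
            · exact Or.inr (Or.inr ⟨hv2, by omega⟩)

-- B computed as a pure map over the list.
theorem alt_eq_map (s : List Int) (g r : Int) :
    repair_structure_any_variant_alt s g r
      = s.map (fun n => if s.count n = 1 then r else n) := by
  unfold repair_structure_any_variant_alt
  refine List.map_congr_left (fun v _ => ?_)
  have hpw : (PySem.List.sorted s (fun v => v) false).Pairwise (· ≤ ·) := by
    have := PySem.List.sorted_pairwise (xs := s) (key := fun v => v)
    simpa using this
  have hperm := PySem.List.sorted_perm (xs := s) (key := fun v => v) (rev := false)
  have hcnt : ∀ w : Int, (PySem.List.sorted s (fun v => v) false).count w = s.count w :=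
    fun w => hperm.count_eq w
  cases hsrt : PySem.List.sorted s (fun v => v) false with
  | nil =>
    have h0 : s.count v = 0 := by rw [← hcnt v, hsrt]; simp
    simp [h0]
  | cons x xs =>
    rw [hsrt] at hpw hcnt
    obtain ⟨hxle, hxspw⟩ := List.pairwise_cons.mp hpw
    have hm := mem_scanRuns xs x true [] hxspw hxle v
    simp only [List.not_mem_nil, false_or] at hm
    have hiff : v ∈ scanRuns xs x true [] ↔ s.count v = 1 := by
      rw [hm, ← hcnt v, List.count_cons]
      by_cases hv : v = x
      · have hif : (if (x == v) = true then 1 else 0) = 1 := by simp [hv.symm]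
        rw [hif]
        constructor
        · rintro (⟨_, _, h⟩ | ⟨h, _⟩)
          · have h0 : xs.count v = 0 := List.count_eq_zero.mpr (by rw [hv]; exact h)
            omega
          · exact absurd hv h
        · intro hc
          have h0 : xs.count v = 0 := by omega
          have hni := List.count_eq_zero.mp h0
          rw [hv] at hni
          exact Or.inl ⟨hv, trivial, hni⟩
      · have hif : (if (x == v) = true then 1 else 0) = 0 := by simp only [beq_iff_eq, ite_eq_right_iff]; exact fun h => absurd h.symm hv
        rw [hif]
        constructor
        · rintro (⟨h, _⟩ | ⟨_, h⟩)
          · exact absurd h hv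
          · omega
        · intro hc
          exact Or.inr ⟨hv, by omega⟩
    show (if v ∈ scanRuns xs x true [] then r else v) = if List.count v s = 1 then r else v
    by_cases hc : s.count v = 1
    · rw [if_pos (hiff.mpr hc), if_pos hc]
    · rw [if_neg (fun h => hc (hiff.mp h)), if_neg hc]

-- A's chained condition, for an element actually in the list (so count ≥ 1).
theorem condA_iff (s : List Int) (n g : Int) (hn : n ∈ s) :
    (((s.count n : Int)) = PySem.Int.band 1 (s.count n : Int)
      ∧ PySem.Int.band 1 (s.count n : Int) ≠ g)
      ↔ (s.count n = 1 ∧ g ≠ 1) := by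
  have h1 : 1 ≤ s.count n := List.one_le_count_iff.mpr hn
  rw [PySem.Int.band_comm, PySem.Int.band_one,
    show (2 : Int) = ((2 : Nat) : Int) from rfl, PySem.Int.mod_natCast]
  have hm : s.count n % 2 < 2 := Nat.mod_lt _ (by norm_num)
  constructor
  · rintro ⟨h2, h3⟩
    have h2' : s.count n = s.count n % 2 := by exact_mod_cast h2
    have hc : s.count n = 1 := by omega
    refine ⟨hc, ?_⟩
    simp only [hc] at h3
    simpa using fun h => h3 h.symm
  · rintro ⟨hc, hg⟩
    refine ⟨by rw [hc], ?_⟩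
    simpa [hc] using fun h => hg h.symm

-- A as a pure map over the list.
theorem a_eq_map (s : List Int) (g r : Int) :
    repair_structure_any_variant s g r
      = s.map (fun n => if s.count n = 1 ∧ g ≠ 1 then r else n) := by
  unfold repair_structure_any_variant
  have h := PySem.List.foldl_congr_mem'
    (l := s) (init := ([] : List Int))
    (f := fun ns n =>
      let c : Int := (PySem.List.count s n : Int)
      if c = PySem.Int.band 1 c ∧ PySem.Int.band 1 c ≠ g then ns ++ [r]
      else if c = 2 then ns ++ [n] else ns ++ [n])
    (g := fun ns n => ns ++ [if s.count n = 1 ∧ g ≠ 1 then r else n])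
    (by
      intro x hx acc
      simp only [PySem.List.count_eq]
      by_cases hcond : ((s.count x : Int)) = PySem.Int.band 1 (s.count x : Int)
          ∧ PySem.Int.band 1 (s.count x : Int) ≠ g
      · rw [if_pos hcond, if_pos ((condA_iff s x g hx).mp hcond)]
      · rw [if_neg hcond, if_neg (fun h => hcond ((condA_iff s x g hx).mpr h))]
        split <;> rfl)
  rw [h, PySem.List.foldl_append_singleton_eq_map]
  simp

theorem repair_structure_any_variant_spec : Claim_unchanged_repair_structure_any_variant := by
  intro s g r _ hD
  rw [a_eq_map, alt_eq_map]
  refine List.map_congr_left (fun n hn => ?_)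
  by_cases hc : s.count n = 1
  · by_cases hg : g = 1
    · have hnr : n = r := by
        by_contra hne
        exact hD ⟨hg, n, hn, hc, hne⟩
      simp [hg, hnr]
    · simp [hc, hg]
  · simp [hc]

theorem repair_structure_any_variant_changed : Claim_changed_repair_structure_any_variant := by
  unfold Claim_changed_repair_structure_any_variant; decide

theorem repair_structure_any_variant_tight : Claim_exact_repair_structure_any_variant := by
  intro s g r _ hD heq
  obtain ⟨hg, n, hn, hc, hnr⟩ := hD
  rw [a_eq_map, alt_eq_map] at heq
  obtain ⟨k, hk, hget⟩ := List.mem_iff_getElem.mp hn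
  have h1 := congrArg (fun l => l[k]?) heq
  simp only [List.getElem?_map, List.getElem?_eq_getElem hk, Option.map_some, hget,
    Option.some_inj] at h1
  rw [if_neg (by simp [hg]), if_pos hc] at h1
  exact hnr h1
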